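-- pv_equiv track=rewrite | github.com/hansweytjens/neurosymbolic_test | check_declare_violations.py | check_precedence
-- ===== SOURCE A (Python) =====
-- def check_precedence(seq, A, B, **_):
--     found_A = False
--     for act in seq:
--         if act == A:
--             found_A = True
--         elif act == B and not found_A:
--             return True
--     return False
-- ===== SOURCE B (Python) =====
-- def check_precedence(seq, A, B, **_):
--     seq = list(seq)
--     try:
--         ib = seq.index(B)
--     except ValueError:
--         return False
--     try:
--         ia = seq.index(A)
--     except ValueError:
--         return True
--     return ib < ia
-- ===== Notes on version B (the rewrite author's own statement) =====
-- stated objective: simpler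
-- what changed: Replaces the stateful found_A scan with two first-occurrence index lookups (list.index) and a strict index comparison ib < ia, which reproduces the absent-B/absent-A/A==B corner values automatically.
import Mathlib
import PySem

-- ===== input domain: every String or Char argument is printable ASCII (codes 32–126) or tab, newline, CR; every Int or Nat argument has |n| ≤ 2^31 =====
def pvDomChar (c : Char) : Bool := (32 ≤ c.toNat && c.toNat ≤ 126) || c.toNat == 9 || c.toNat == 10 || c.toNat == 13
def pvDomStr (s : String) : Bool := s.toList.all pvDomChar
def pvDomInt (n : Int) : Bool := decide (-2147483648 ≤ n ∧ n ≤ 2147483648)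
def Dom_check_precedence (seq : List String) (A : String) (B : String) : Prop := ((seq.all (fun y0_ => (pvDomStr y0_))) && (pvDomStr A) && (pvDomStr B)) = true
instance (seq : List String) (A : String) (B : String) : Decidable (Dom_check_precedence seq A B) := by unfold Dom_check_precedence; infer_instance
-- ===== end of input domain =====

-- B: two first-occurrence index lookups + strict comparison, instead of A's stateful found_A scan; equivalence proved on all inputs.
-- ===== PORT A =====
def checkPrecLoop (A B : String) : List String → Bool → Bool
  | [], _ => false
  | act :: rest, foundA =>
      if act == A then checkPrecLoop A B rest true
      else if act == B && !foundA then true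
      else checkPrecLoop A B rest foundA

def check_precedence (seq : List String) (A : String) (B : String) : Bool :=
  checkPrecLoop A B seq false

-- ===== PORT B =====
def check_precedence_alt (seq : List String) (A : String) (B : String) : Bool :=
  match PySem.List.index? seq B with
  | none => false
  | some ib =>
    match PySem.List.index? seq A with
    | none => true
    | some ia => decide (ib < ia)

-- ===== PRECONDITION & SPEC =====
def Spec_check_precedence (seq : List String) (A : String) (B : String) (out : Bool) : Prop := out = check_precedence_alt seq A B
instance (seq : List String) (A : String) (B : String) (out : Bool) : Decidable (Spec_check_precedence seq A B out) := by unfold Spec_check_precedence; infer_instance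

-- ===== CLAIM (what is proved, stated in full; the proofs are below) =====
def Claim_equal_check_precedence : Prop := ∀ (seq : List String) (A : String) (B : String), Dom_check_precedence seq A B → Spec_check_precedence seq A B (check_precedence seq A B)

-- ===== LEMMAS AND PROOFS =====

-- ===== VERDICT (by name: the statement is the Claim_ definition above) =====
theorem idx_cons (x v : String) (xs : List String) :
    PySem.List.index? (x :: xs) v = if x = v then some 0 else (PySem.List.index? xs v).map (· + 1) := by
  by_cases h : x = v
  · subst h; simp [List.idxOf?, List.findIdx?_cons]
  · simp [List.idxOf?, List.findIdx?_cons, h]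

theorem loop_true_false (A B : String) (l : List String) : checkPrecLoop A B l true = false := by
  induction l with
  | nil => rfl
  | cons x xs ih =>
      simp only [checkPrecLoop]
      split
      · exact ih
      · simp [ih]

theorem loop_false_eq_alt (A B : String) (l : List String) :
    checkPrecLoop A B l false = check_precedence_alt l A B := by
  induction l with
  | nil => rfl
  | cons x xs ih =>
      simp only [checkPrecLoop, check_precedence_alt] at *
      rw [idx_cons x A xs, idx_cons x B xs]
      by_cases hA : x = A
      · rw [if_pos (by simp [hA]), loop_true_false, if_pos hA]
        by_cases hB : x = B
        · rw [if_pos hB]; rfl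
        · rw [if_neg hB]
          cases PySem.List.index? xs B <;> simp
      · rw [if_neg (by simp [hA]), if_neg hA]
        by_cases hB : x = B
        · rw [if_pos hB, if_pos (by simp [hB])]
          cases PySem.List.index? xs A <;> simp
        · rw [if_neg (by simp [hB]), if_neg hB, ih]
          cases PySem.List.index? xs B with
          | none => simp
          | some ib => cases PySem.List.index? xs A <;> simp

theorem check_precedence_spec : Claim_equal_check_precedence := by
  intro seq A B _
  unfold Spec_check_precedence check_precedence
  exact loop_false_eq_alt A B seq
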